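-- pv_equiv track=rewrite | github.com/Alfredliang2023/weave | build/lib/weave_generator/Twill_weave_generator.py | Twill_weave_matrix
-- ===== SOURCE A (Python) =====
-- from itertools import zip_longest
--
-- def Twill_weave_matrix(param1, param2, direction):
--     # 验证参数
--     if not all(isinstance(x, int) and x > 0 for x in param1 + param2):
--         raise ValueError("参数组必须包含正整数")
--
--     # 计算矩阵大小
--     rows = sum(param1) + sum(param2)
--     cols = rows  # 行列数相同
--
--     # 生成第一列
--     first_col = []
--     # 自下而上生成
--     # 交替处理参数组1和参数组2的元素
--     for ones, zeros in zip_longest(param1, param2, fillvalue=0):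
--         if ones > 0:
--             first_col[0:0] = [1] * ones
--         if zeros > 0:
--             first_col[0:0] = [0] * zeros
--
--     # 确保长度正确
--     first_col = first_col[-rows:] if len(first_col) > rows else first_col
--
--     # 根据方向生成矩阵
--     matrix = []
--     current_col = first_col.copy()
--
--     for _ in range(cols):
--         matrix.append(current_col.copy())
--         if direction == "右":
--             # 将最下面元素移到最上面
--             current_col = current_col[1:] + [current_col[0]]
--         elif direction == "左":
--             # 将最上面元素移到最下面
--             current_col = [current_col[-1]] + current_col[:-1]
--
--     # 转置矩阵，使每行对应输出的一行
--     matrix = list(zip(*matrix))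
--
--     return matrix
-- ===== SOURCE B (Python) =====
-- def Twill_weave_matrix(param1, param2, direction):
--     if not all(isinstance(x, int) and x > 0 for x in param1 + param2):
--         raise ValueError("参数组必须包含正整数")
--     # build the first column bottom-up by appending, scanning the pairs last-to-first
--     first_col = []
--     for i in range(max(len(param1), len(param2)) - 1, -1, -1):
--         if i < len(param2):
--             first_col += [0] * param2[i]
--         if i < len(param1):
--             first_col += [1] * param1[i]
--     rows = len(first_col)
--     # each cell by a closed-form cyclic index instead of rotating and transposing
--     if direction == "右":
--         return [tuple(first_col[(r + c) % rows] for c in range(rows)) for r in range(rows)]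
--     if direction == "左":
--         return [tuple(first_col[(r - c) % rows] for c in range(rows)) for r in range(rows)]
--     return [tuple(first_col[r] for _ in range(rows)) for r in range(rows)]
-- ===== Notes on version B (the rewrite author's own statement) =====
-- stated objective: simpler
-- what changed: B replaces the prepend-based column build, the n-step rotate-and-collect loop and the zip(*) transpose by a closed-form cell formula first_col[(r±c) % rows] computed directly per row.
import Mathlib
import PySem

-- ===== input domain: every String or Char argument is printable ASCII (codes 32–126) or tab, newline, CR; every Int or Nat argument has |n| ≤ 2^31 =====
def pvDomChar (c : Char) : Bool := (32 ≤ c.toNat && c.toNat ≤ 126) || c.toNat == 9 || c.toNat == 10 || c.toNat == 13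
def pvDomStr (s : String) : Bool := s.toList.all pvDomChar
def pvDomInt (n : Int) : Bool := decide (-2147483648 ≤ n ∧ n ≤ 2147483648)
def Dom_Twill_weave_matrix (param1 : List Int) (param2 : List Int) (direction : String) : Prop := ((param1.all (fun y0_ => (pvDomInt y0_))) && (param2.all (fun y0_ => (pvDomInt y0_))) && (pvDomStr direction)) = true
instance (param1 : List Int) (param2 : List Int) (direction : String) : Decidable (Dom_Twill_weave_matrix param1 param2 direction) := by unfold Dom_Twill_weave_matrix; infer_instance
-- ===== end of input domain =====

-- B builds each cell by a closed-form cyclic index first_col[(r±c) % rows] instead of A's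
-- rotate-n-times-then-transpose; equivalence of the return values is proved on all inputs
-- where A returns (Pre_: all parameters positive; otherwise both raise ValueError).

-- ===== PORT A =====

-- itertools.zip_longest(param1, param2, fillvalue=0)
def pvZipLongest0 : List Int → List Int → List (Int × Int)
  | [], [] => []
  | a :: as, [] => (a, 0) :: pvZipLongest0 as []
  | [], b :: bs => (0, b) :: pvZipLongest0 [] bs
  | a :: as, b :: bs => (a, b) :: pvZipLongest0 as bs

-- current_col[1:] + [current_col[0]]  (the loop only ever sees nonempty columns, where headD 0 is current_col[0])
def pvRotR (l : List Int) : List Int := l.drop 1 ++ [l.headD 0]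
-- [current_col[-1]] + current_col[:-1]
def pvRotL (l : List Int) : List Int := [l.getLastD 0] ++ l.dropLast

-- the 'for _ in range(cols)' loop collecting columns
def pvLoopA (direction : String) : Nat → List Int → List (List Int)
  | 0, _ => []
  | n + 1, cur => cur ::
      pvLoopA direction n
        (if direction = "右" then pvRotR cur else if direction = "左" then pvRotL cur else cur)

-- list(zip(*matrix)) : rows of heads until some list is exhausted
def pvZipStar (m : List (List Int)) : List (List Int) :=
  if h : m.isEmpty || m.any (·.isEmpty) then []
  else (m.map (·.headD 0)) :: pvZipStar (m.map (·.drop 1))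
termination_by (m.headD []).length
decreasing_by
  cases m with
  | nil => simp at h
  | cons a t =>
    cases a with
    | nil => simp at h
    | cons x xs => simp

def Twill_weave_matrix (param1 : List Int) (param2 : List Int) (direction : String) : List (List Int) :=
  if (param1 ++ param2).all (fun x => decide (0 < x)) then
    let rows : Int := param1.sum + param2.sum
    let fc0 : List Int :=
      (pvZipLongest0 param1 param2).foldl
        (fun fc p =>
          (if 0 < p.2 then List.replicate p.2.toNat 0 else []) ++
            ((if 0 < p.1 then List.replicate p.1.toNat 1 else []) ++ fc)) []
    -- first_col[0:0] = [1]*ones happens before [0]*zeros, so zeros end up in front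
    let fc : List Int :=
      if rows < (fc0.length : Int) then PySem.List.slice fc0 (some (-rows)) none else fc0
    pvZipStar (pvLoopA direction rows.toNat fc)
  else []  -- raise ValueError (excluded by Pre_)

-- ===== PORT B =====
def Twill_weave_matrix_alt (param1 : List Int) (param2 : List Int) (direction : String) : List (List Int) :=
  if (param1 ++ param2).all (fun x => decide (0 < x)) then
    let fc : List Int :=
      ((List.range (max param1.length param2.length)).reverse).foldl
        (fun acc i =>
          (acc ++ (if i < param2.length then List.replicate (param2.getD i 0).toNat 0 else [])) ++
            (if i < param1.length then List.replicate (param1.getD i 0).toNat 1 else [])) []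
    let rows : Nat := fc.length
    if direction = "右" then
      (List.range rows).map (fun (r : Nat) => (List.range rows).map (fun (c : Nat) =>
        fc.getD (PySem.Int.mod ((r : Int) + (c : Int)) (rows : Int)).toNat 0))
    else if direction = "左" then
      (List.range rows).map (fun (r : Nat) => (List.range rows).map (fun (c : Nat) =>
        fc.getD (PySem.Int.mod ((r : Int) - (c : Int)) (rows : Int)).toNat 0))
    else
      (List.range rows).map (fun r => (List.range rows).map (fun _ => fc.getD r 0))
  else []  -- raise ValueError (excluded by Pre_)

-- ===== PRECONDITION & SPEC =====
-- A raises ValueError exactly when some parameter entry is not positive (B raises identically);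
-- Pre_ excludes only those crashing inputs.
def Pre_Twill_weave_matrix (param1 : List Int) (param2 : List Int) (direction : String) : Prop :=
  ∀ x ∈ param1 ++ param2, 0 < x
instance (param1 : List Int) (param2 : List Int) (direction : String) : Decidable (Pre_Twill_weave_matrix param1 param2 direction) := by unfold Pre_Twill_weave_matrix; infer_instance

def pvWitness_Twill_weave_matrix : List Int × List Int × String := ([2, 1], [1, 2], "r")

def Spec_Twill_weave_matrix (param1 : List Int) (param2 : List Int) (direction : String) (out : List (List Int)) : Prop := out = Twill_weave_matrix_alt param1 param2 direction
instance (param1 : List Int) (param2 : List Int) (direction : String) (out : List (List Int)) : Decidable (Spec_Twill_weave_matrix param1 param2 direction out) := by unfold Spec_Twill_weave_matrix; infer_instance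

-- ===== CLAIM (what is proved, stated in full; the proofs are below) =====
def Claim_equal_Twill_weave_matrix : Prop := ∀ (param1 : List Int) (param2 : List Int) (direction : String), Dom_Twill_weave_matrix param1 param2 direction → Pre_Twill_weave_matrix param1 param2 direction → Spec_Twill_weave_matrix param1 param2 direction (Twill_weave_matrix param1 param2 direction)

-- ===== LEMMAS AND PROOFS =====

-- the common first column, as one flatMap
def pvFC (p1 p2 : List Int) : List Int :=
  ((List.range (max p1.length p2.length)).reverse).flatMap
    (fun i => List.replicate (p2.getD i 0).toNat 0 ++ List.replicate (p1.getD i 0).toNat 1)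

theorem rep_if (x v : Int) :
    (if 0 < x then List.replicate x.toNat v else []) = List.replicate x.toNat v := by
  split
  · rfl
  · rw [Int.toNat_of_nonpos (by omega)]; rfl

theorem blk_if (p : List Int) (i : Nat) (v : Int) :
    (if i < p.length then List.replicate (p.getD i 0).toNat v else []) =
      List.replicate (p.getD i 0).toNat v := by
  split
  · rfl
  · rw [List.getD_eq_default _ _ (by omega)]; rfl

theorem foldA_eq (L : List (Int × Int)) (acc : List Int) :
    L.foldl
      (fun fc p =>
        (if 0 < p.2 then List.replicate p.2.toNat 0 else []) ++
          ((if 0 < p.1 then List.replicate p.1.toNat 1 else []) ++ fc)) acc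
    = L.reverse.flatMap
        (fun p => List.replicate p.2.toNat 0 ++ List.replicate p.1.toNat 1) ++ acc := by
  induction L generalizing acc with
  | nil => simp
  | cons p t ih =>
    rw [List.foldl_cons, ih]
    simp [rep_if, List.append_assoc]

theorem foldB_eq (f g : Nat → List Int) (is : List Nat) (acc : List Int) :
    is.foldl (fun acc i => (acc ++ f i) ++ g i) acc = acc ++ is.flatMap (fun i => f i ++ g i) := by
  induction is generalizing acc with
  | nil => simp
  | cons i t ih =>
    rw [List.foldl_cons, ih, List.flatMap_cons]
    simp [List.append_assoc]

theorem zipLongest_nil (p2 : List Int) :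
    pvZipLongest0 [] p2 = (List.range p2.length).map (fun i => ((0 : Int), p2.getD i 0)) := by
  induction p2 with
  | nil => simp [pvZipLongest0]
  | cons b bs ih => simp [pvZipLongest0, ih, List.range_succ_eq_map, List.map_map]

theorem zipLongest_eq (p1 p2 : List Int) :
    pvZipLongest0 p1 p2 =
      (List.range (max p1.length p2.length)).map (fun i => (p1.getD i 0, p2.getD i 0)) := by
  induction p1 generalizing p2 with
  | nil => simpa using zipLongest_nil p2
  | cons a t ih =>
    cases p2 with
    | nil => simp [pvZipLongest0, ih, List.range_succ_eq_map, List.map_map]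
    | cons b bs =>
      simp [pvZipLongest0, ih, Nat.succ_max_succ, List.range_succ_eq_map, List.map_map]

theorem fcA_eq (p1 p2 : List Int) :
    (pvZipLongest0 p1 p2).foldl
      (fun fc p =>
        (if 0 < p.2 then List.replicate p.2.toNat 0 else []) ++
          ((if 0 < p.1 then List.replicate p.1.toNat 1 else []) ++ fc)) []
    = pvFC p1 p2 := by
  rw [foldA_eq, zipLongest_eq, ← List.map_reverse, List.flatMap_map, pvFC, List.append_nil]

theorem fcB_eq (p1 p2 : List Int) :
    ((List.range (max p1.length p2.length)).reverse).foldl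
      (fun acc i =>
        (acc ++ (if i < p2.length then List.replicate (p2.getD i 0).toNat 0 else [])) ++
          (if i < p1.length then List.replicate (p1.getD i 0).toNat 1 else [])) []
    = pvFC p1 p2 := by
  rw [foldB_eq, pvFC]
  simp only [blk_if, List.nil_append]

theorem sum_getD_toNat (p : List Int) (n : Nat) (hn : p.length ≤ n) :
    ((List.range n).map (fun i => (p.getD i 0).toNat)).sum = (p.map Int.toNat).sum := by
  induction p generalizing n with
  | nil => simp
  | cons a t ih =>
    cases n with
    | zero => simp at hn
    | succ m =>
      simp [List.range_succ_eq_map, List.map_map]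
      exact ih m (by simpa using hn)

theorem sum_toNat_cast (p : List Int) (hpos : ∀ x ∈ p, 0 ≤ x) :
    (((p.map Int.toNat).sum : Nat) : Int) = p.sum := by
  induction p with
  | nil => simp
  | cons a t ih =>
    have ht := ih (fun x hx => hpos x (by simp [hx]))
    simp only [List.map_cons, List.sum_cons, Nat.cast_add]
    rw [Int.toNat_of_nonneg (hpos a (by simp)), ht]

theorem sum_map_add_nat {α : Type} (l : List α) (f g : α → Nat) :
    (l.map (fun i => f i + g i)).sum = (l.map f).sum + (l.map g).sum := by
  induction l with
  | nil => rfl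
  | cons a t ih => simp [ih]; omega

theorem pvFC_length (p1 p2 : List Int) (hpos : ∀ x ∈ p1 ++ p2, 0 < x) :
    ((pvFC p1 p2).length : Int) = p1.sum + p2.sum := by
  have h1 : ∀ x ∈ p1, (0:Int) ≤ x := fun x hx => le_of_lt (hpos x (by simp [hx]))
  have h2 : ∀ x ∈ p2, (0:Int) ≤ x := fun x hx => le_of_lt (hpos x (by simp [hx]))
  rw [pvFC, List.length_flatMap]
  simp only [List.length_append, List.length_replicate]
  rw [List.map_reverse, List.sum_reverse, sum_map_add_nat,
    sum_getD_toNat p2 _ (le_max_right _ _), sum_getD_toNat p1 _ (le_max_left _ _)]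
  push_cast [sum_toNat_cast p1 h1, sum_toNat_cast p2 h2]
  ring

-- loop closed form
def pvStep (direction : String) (cur : List Int) : List Int :=
  if direction = "右" then pvRotR cur else if direction = "左" then pvRotL cur else cur

theorem loopA_eq (d : String) (n : Nat) :
    ∀ cur, pvLoopA d n cur = (List.range n).map (fun k => (pvStep d)^[k] cur) := by
  induction n with
  | zero => intro cur; rfl
  | succ m ih =>
    intro cur
    simp only [pvLoopA, List.range_succ_eq_map, List.map_cons, Function.iterate_zero, id_eq,
      List.map_map]
    congr 1
    rw [ih]
    apply List.map_congr_left
    intro k _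
    simp only [Function.comp_apply, Function.iterate_succ_apply]
    rfl

theorem rotR_length (l : List Int) (hl : l ≠ []) : (pvRotR l).length = l.length := by
  cases l with
  | nil => exact absurd rfl hl
  | cons a t => simp [pvRotR]

theorem rotL_length (l : List Int) (hl : l ≠ []) : (pvRotL l).length = l.length := by
  cases l with
  | nil => exact absurd rfl hl
  | cons a t => simp [pvRotL]

theorem step_length (d : String) (l : List Int) (hl : l ≠ []) :
    (pvStep d l).length = l.length := by
  unfold pvStep
  split_ifs
  · exact rotR_length l hl
  · exact rotL_length l hl
  · rfl

theorem emod_add_left (x k n : Int) : (x.emod n + k).emod n = (x + k).emod n := by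
  show (x % n + k) % n = (x + k) % n
  rw [Int.emod_def x n]
  rw [show x - n * (x / n) + k = x + k + n * (-(x / n)) by ring, Int.add_mul_emod_self_left]

theorem iter_pres (f : List Int → List Int) (hf : ∀ l, l ≠ [] → (f l).length = l.length)
    (l : List Int) (hl : l ≠ []) (k : Nat) : (f^[k] l).length = l.length := by
  induction k with
  | zero => rfl
  | succ m ih =>
    have hne : f^[m] l ≠ [] := by
      intro hnil
      rw [hnil] at ih
      exact hl (List.eq_nil_of_length_eq_zero ih.symm)
    rw [Function.iterate_succ_apply', hf _ hne, ih]

theorem headD_eq_getD (l : List Int) : l.headD 0 = l.getD 0 0 := by cases l <;> rfl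

theorem getD_drop_one (l : List Int) (r : Nat) : (l.drop 1).getD r 0 = l.getD (r + 1) 0 := by
  cases l <;> rfl

theorem rotR_getD (l : List Int) (hl : l ≠ []) (r : Nat) (hr : r < l.length) :
    (pvRotR l).getD r 0 = l.getD (((r : Int) + 1).emod l.length).toNat 0 := by
  cases l with
  | nil => exact absurd rfl hl
  | cons a t =>
    by_cases hc : r < t.length
    · have hm : ((r : Int) + 1).emod ((a :: t).length : Nat) = (r : Int) + 1 := by
        apply Int.emod_eq_of_lt (by omega)
        simp only [List.length_cons]
        omega
      rw [hm]
      have ht : ((r : Int) + 1).toNat = r + 1 := by omega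
      rw [ht]
      simp only [pvRotR, List.drop_one, List.tail_cons, List.headD_cons, List.getD_cons_succ]
      rw [List.getD_append _ _ _ _ hc]
    · have hr' : r = t.length := by simp only [List.length_cons] at hr; omega
      subst hr'
      have hm : ((t.length : Int) + 1).emod ((a :: t).length : Nat) = 0 := by
        simp only [List.length_cons]
        exact_mod_cast Int.emod_self
      rw [hm]
      simp only [pvRotR, List.drop_one, List.tail_cons, List.headD_cons, Int.toNat_zero,
        List.getD_cons_zero]
      rw [List.getD_eq_getElem?_getD, List.getElem?_concat_length]
      rfl

theorem rotL_getD (l : List Int) (hl : l ≠ []) (r : Nat) (hr : r < l.length) :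
    (pvRotL l).getD r 0 = l.getD (((r : Int) - 1).emod l.length).toNat 0 := by
  cases l with
  | nil => exact absurd rfl hl
  | cons a t =>
    cases r with
    | zero =>
      have hm : ((0 : Int) - 1).emod ((a :: t).length : Nat) = ((a :: t).length : Int) - 1 := by
        show ((0 : Int) - 1) % ((a :: t).length : Nat) = ((a :: t).length : Int) - 1
        have h1 : (((a :: t).length : Int) - 1 + ((a :: t).length : Int) * (-1)) %
            ((a :: t).length : Int) = (((a :: t).length : Int) - 1) % ((a :: t).length : Int) :=
          Int.add_mul_emod_self_left ..
        have h2 : (((a :: t).length : Int) - 1) % ((a :: t).length : Int) =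
            ((a :: t).length : Int) - 1 := by
          apply Int.emod_eq_of_lt <;> simp only [List.length_cons] <;> omega
        have h3 : ((a :: t).length : Int) - 1 + ((a :: t).length : Int) * (-1) = 0 - 1 := by ring
        rw [h3, h2] at h1
        exact h1
      rw [Nat.cast_zero, hm]
      have ht : (((a :: t).length : Int) - 1).toNat = t.length := by
        simp only [List.length_cons]; omega
      rw [ht]
      simp only [pvRotL, List.singleton_append, List.getD_cons_zero]
      rw [List.getLastD_eq_getLast?, List.getD_eq_getElem?_getD, List.getLast?_eq_getElem?]
      simp
    | succ s =>
      have hs : s < t.length := by simp only [List.length_cons] at hr; omega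
      have hm : (((s : Nat) + 1 : Int) - 1).emod ((a :: t).length : Nat) = (s : Int) := by
        have : ((s : Nat) + 1 : Int) - 1 = (s : Int) := by omega
        rw [this]
        apply Int.emod_eq_of_lt (by omega)
        simp only [List.length_cons]
        omega
      have hm' : (((s + 1 : Nat) : Int) - 1).emod ((a :: t).length : Nat) = (s : Int) := by
        push_cast at hm ⊢
        exact hm
      rw [hm']
      simp only [Int.toNat_natCast, pvRotL, List.singleton_append, List.getD_cons_succ]
      rw [List.getD_eq_getElem?_getD, List.getD_eq_getElem?_getD, List.getElem?_dropLast]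
      simp only [List.length_cons]
      rw [if_pos (by omega)]

theorem iterR_getD (l : List Int) (hl : l ≠ []) :
    ∀ (k r : Nat), r < l.length →
      ((pvRotR)^[k] l).getD r 0 = l.getD (((r : Int) + (k : Int)).emod l.length).toNat 0 := by
  intro k
  induction k with
  | zero =>
    intro r hr
    have hm : ((r : Int) + (0 : Nat)).emod l.length = (r : Int) := by
      simp only [Nat.cast_zero, add_zero]
      exact Int.emod_eq_of_lt (by omega) (by exact_mod_cast hr)
    rw [Function.iterate_zero, id_eq, hm, Int.toNat_natCast]
  | succ m ih =>
    intro r hr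
    have hlen : ((pvRotR)^[m] l).length = l.length := iter_pres pvRotR rotR_length l hl m
    have hne : (pvRotR)^[m] l ≠ [] := by
      intro hnil; rw [hnil] at hlen
      exact hl (List.eq_nil_of_length_eq_zero hlen.symm)
    have hlpos : (0 : Int) < l.length := by
      have := List.length_pos_of_ne_nil hl; omega
    rw [Function.iterate_succ_apply', rotR_getD _ hne r (by omega), hlen]
    have h0 : 0 ≤ ((r : Int) + 1).emod l.length := Int.emod_nonneg _ (by omega)
    have h1 : ((r : Int) + 1).emod l.length < l.length := Int.emod_lt_of_pos _ hlpos
    rw [ih (((r : Int) + 1).emod l.length).toNat (by omega)]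
    congr 2
    rw [Int.toNat_of_nonneg h0, emod_add_left]
    congr 1
    push_cast
    ring

theorem iterL_getD (l : List Int) (hl : l ≠ []) :
    ∀ (k r : Nat), r < l.length →
      ((pvRotL)^[k] l).getD r 0 = l.getD (((r : Int) - (k : Int)).emod l.length).toNat 0 := by
  intro k
  induction k with
  | zero =>
    intro r hr
    have hm : ((r : Int) - (0 : Nat)).emod l.length = (r : Int) := by
      simp only [Nat.cast_zero, sub_zero]
      exact Int.emod_eq_of_lt (by omega) (by exact_mod_cast hr)
    rw [Function.iterate_zero, id_eq, hm, Int.toNat_natCast]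
  | succ m ih =>
    intro r hr
    have hlen : ((pvRotL)^[m] l).length = l.length := iter_pres pvRotL rotL_length l hl m
    have hne : (pvRotL)^[m] l ≠ [] := by
      intro hnil; rw [hnil] at hlen
      exact hl (List.eq_nil_of_length_eq_zero hlen.symm)
    have hlpos : (0 : Int) < l.length := by
      have := List.length_pos_of_ne_nil hl; omega
    rw [Function.iterate_succ_apply', rotL_getD _ hne r (by omega), hlen]
    have h0 : 0 ≤ ((r : Int) - 1).emod l.length := Int.emod_nonneg _ (by omega)
    have h1 : ((r : Int) - 1).emod l.length < l.length := Int.emod_lt_of_pos _ hlpos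
    rw [ih (((r : Int) - 1).emod l.length).toNat (by omega)]
    congr 2
    rw [Int.toNat_of_nonneg h0]
    rw [show ((r : Int) - 1).emod ↑l.length - (m : Int)
        = ((r : Int) - 1).emod ↑l.length + (-(m : Int)) by ring, emod_add_left]
    congr 1
    push_cast
    ring

theorem zipStar_eq (n : Nat) (m : List (List Int)) (hm : m ≠ [])
    (hlen : ∀ c ∈ m, c.length = n) :
    pvZipStar m = (List.range n).map (fun r => m.map (fun col => col.getD r 0)) := by
  induction n generalizing m with
  | zero =>
    cases m with
    | nil => exact absurd rfl hm
    | cons c t =>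
      have hc : c = [] := List.eq_nil_of_length_eq_zero (hlen c (by simp))
      rw [pvZipStar]
      simp [hc]
  | succ k ih =>
    have hninl : ∀ c ∈ m, c ≠ [] := by
      intro c hc hnil
      have := hlen c hc
      rw [hnil] at this
      simp at this
    have hany : m.any (·.isEmpty) = false := by
      rw [List.any_eq_false]
      intro c hc
      simpa [List.isEmpty_iff] using hninl c hc
    have hcond : (m.isEmpty || m.any (·.isEmpty)) = false := by
      simp [hm, hany]
    rw [pvZipStar, dif_neg (by simp [hcond])]
    have hmap_ne : m.map (·.drop 1) ≠ [] := by simpa using hm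
    have hmap_len : ∀ c ∈ m.map (·.drop 1), c.length = k := by
      intro c hc
      obtain ⟨c', hc', rfl⟩ := List.mem_map.1 hc
      simp [hlen c' hc']
    rw [ih _ hmap_ne hmap_len, List.range_succ_eq_map, List.map_cons, List.map_map]
    congr 1
    · exact List.map_congr_left fun c _ => headD_eq_getD c
    · apply List.map_congr_left
      intro r _
      simp only [Function.comp_apply, List.map_map]
      exact List.map_congr_left fun c _ => getD_drop_one c r

theorem main_eq (p1 p2 : List Int) (d : String) (h : ∀ x ∈ p1 ++ p2, 0 < x) :
    Twill_weave_matrix p1 p2 d = Twill_weave_matrix_alt p1 p2 d := by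
  have hg : ((p1 ++ p2).all fun x => decide (0 < x)) = true := by
    simp only [List.all_eq_true, decide_eq_true_eq]
    exact h
  have hlen : ((pvFC p1 p2).length : Int) = p1.sum + p2.sum := pvFC_length p1 p2 h
  unfold Twill_weave_matrix Twill_weave_matrix_alt
  rw [if_pos hg, if_pos hg]
  simp only [fcA_eq, fcB_eq]
  rw [if_neg (by omega)]
  have hN : (p1.sum + p2.sum).toNat = (pvFC p1 p2).length := by omega
  rw [hN]
  set fc := pvFC p1 p2 with hfc
  set N := fc.length with hNdef
  rcases Nat.eq_zero_or_pos N with hN0 | hNpos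
  · have hfc0 : fc = [] := List.eq_nil_of_length_eq_zero hN0
    have hzs : pvZipStar [] = [] := by rw [pvZipStar]; simp
    rw [hN0, hfc0, show pvLoopA d 0 [] = [] from rfl, hzs]
    split_ifs <;> simp
  · have hfcne : fc ≠ [] := by
      intro hnil
      have hz : N = 0 := by rw [hNdef, hnil]; rfl
      omega
    have hNpos' : (0 : Int) < (N : Int) := by omega
    have hcols : ∀ c ∈ (List.range N).map (fun k => (pvStep d)^[k] fc), c.length = N := by
      intro c hc
      obtain ⟨k, _, rfl⟩ := List.mem_map.1 hc
      rw [iter_pres (pvStep d) (step_length d) fc hfcne k]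
    have hmne : (List.range N).map (fun k => (pvStep d)^[k] fc) ≠ [] := by
      simp
      omega
    have key : pvZipStar (pvLoopA d N fc) =
        (List.range N).map (fun r => (List.range N).map (fun c => ((pvStep d)^[c] fc).getD r 0)) := by
      rw [loopA_eq, zipStar_eq N _ hmne hcols]
      simp only [List.map_map]
      rfl
    rw [key]
    by_cases hd : d = "右"
    · have hstep : pvStep d = pvRotR := funext fun l => by simp [pvStep, hd]
      rw [if_pos hd]
      apply List.map_congr_left
      intro r hr
      apply List.map_congr_left
      intro c hc
      rw [List.mem_range] at hr hc
      rw [hstep, iterR_getD fc hfcne c r (by omega),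
        PySem.Int.mod_eq_emod_of_pos hNpos']
      rfl
    · by_cases hd2 : d = "左"
      · have hstep : pvStep d = pvRotL := funext fun l => by simp [pvStep, hd2]
        rw [if_neg hd, if_pos hd2]
        apply List.map_congr_left
        intro r hr
        apply List.map_congr_left
        intro c hc
        rw [List.mem_range] at hr hc
        rw [hstep, iterL_getD fc hfcne c r (by omega),
          PySem.Int.mod_eq_emod_of_pos hNpos']
        rfl
      · have hstep : pvStep d = id := funext fun l => by simp [pvStep, hd, hd2]
        rw [if_neg hd, if_neg hd2]
        apply List.map_congr_left
        intro r hr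
        apply List.map_congr_left
        intro c hc
        rw [hstep, Function.iterate_id, id_eq]

-- ===== VERDICT (by name: the statement is the Claim_ definition above) =====
theorem Twill_weave_matrix_spec : Claim_equal_Twill_weave_matrix := by
  intro p1 p2 d _ hpre
  exact main_eq p1 p2 d hpre
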